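/- GENERATED by tools/from_farm_form.py from prooffarm-gif/accepted/DGifGetLine.2/Lemmas.lean (a worked proof of the farm's unit `DGifGetLine.2`,
   accepted by the verdict) — do not edit. -/
import Gif.Spec.Units.DGifGetLine_2
import Gif.Spec.AllSegs

/-!
  Lemmas for the unit `DGifGetLine.2` (a BODY segment of a protected function: the call of DGifDecompressLine with the caller's
  buffer passed on, then a checked load of `pv.PixelCount`): the segment is walked in TWO STEPS that meet at the call's return
  address 0x10a2d2 (`ret7`), with a private assertion there.

      gl2_AtRet7       the assertion at `ret7`: `Body` + `r14 = Private` + the result of DGifDecompressLine in `rax`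
      gl2_seg_call     0x10a2c4 … the call of DGifDecompressLine … 0x10a2d2: `AtCall` → `gl2_AtRet7`
      gl2_seg_tail     0x10a2d2 … 0x10a2ea | 0x10a28e (three arms): `gl2_AtRet7` → `Head` ∨ `Done`
-/

open X86 X86.User Asan ProgX.Base ProgX.Base.Spec Gif.Spec

set_option maxRecDepth 4000
set_option maxHeartbeats 4000000

namespace Gif.Spec.DGifGetLine_2

/-- **At 10A2D2H (ret7), `DGifDecompressLine(gif, Line, LineLen)` has returned**: `Body`, `r14 = Private` (callee-saved), and
`rax` = GIF_OK or GIF_ERROR. -/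
structure gl2_AtRet7 (H : Heap) (rest : List Obj) (frames : List (Nat × FrameLayout)) (F : Forest) (R : Rd) (n : Nat)
    (u₀ e : State) (ret : Word) (v : State) : Prop where
  body : DGifGetLine.Body Gif.L.DGifGetLine.ret7 H rest frames F R n u₀ e ret v
  r14 : (v.reg .r14).toNat = F.pv
  res : (v.reg .rax).toNat = 1 ∨ (v.reg .rax).toNat = 0

/-- **10A2C4H … the call of DGifDecompressLine … 10A2D2H (ret7)** (dgif_lib.c:504). `edx = r13d = LineLen`, `rsi = r15 = Line`
(the entry's buffer, under one more frame), `rdi = rbp = gif`. -/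
theorem gl2_seg_call (Lay : Layout) (hLay : Lay.hi = 0x1000000) (μ : Microarch) (hμ : UserX.MicroOK μ) (u₀ : State)
    (hcode : HasCodeNat Lay u₀ Gif.L.DGifGetLine.entry Gif.Code.code_DGifGetLine.nat Gif.L.DGifGetLine.size)
    (H : Heap) (rest : List Obj) (frames : List (Nat × FrameLayout)) (F : Forest) (R : Rd) (n : Nat) (e : State) (ret : Word)
    (h_DGifDecompressLine : Calls Lay μ ProgX.Base.WayInv (ProgX.Base.conv u₀) Gif.L.DGifDecompressLine.entry
      (Gif.Spec.DGifDecompressLine.spec H rest (DGifGetLine.framesIn frames e) F R n))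
    (v : State) (hat : DGifGetLine.AtCall H rest frames F R n u₀ e ret v) :
    ReachVia Lay μ ProgX.Base.WayInv v (gl2_AtRet7 H rest frames F R n u₀ e ret) := by
  -- THE PRELUDE: the entry assertion `AtCall` = `Body` + `r14 = Private` + `r13 = LineLen`
  obtain ⟨hbody, hr14, hr13⟩ := hat
  have he := hbody.entry
  v_entry he
  obtain ⟨henv, hlz0, hrdi, hrdx, hn1, hn31, hbuf, hsep⟩ := hbody.pre
  have w_rip := hbody.rip
  have c_rsp : v.reg .rsp = e.reg .rsp - 120 := hbody.rsp
  have c_rbp : v.reg .rbp = e.reg .rdi := hbody.rbp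
  have c_r15 : v.reg .r15 = e.reg .rsi := hbody.r15
  have w_kept : RegsKept [.rsp] v v := RegsKept.refl _ _
  have w_eq : Mem.EqOn ProgX.Base.L.textLo ProgX.Base.L.textHi u₀.mem v.mem := ProgX.Base.conv_code_eqOn hbody.code
  have hdf := (show abiInv _ from hbody.abi).1
  have hmx := (show abiInv _ from hbody.abi).2
  have hsse := ProgX.Base.sseOK_of_abiInv hbody.abi
  -- the slots and the footprint that `Body` at the exit states again
  have k_r15 : v.mem.readLE (e.reg .rsp - 8) 8 = (e.reg .r15).toNat := hbody.slot_r15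
  have k_r14 : v.mem.readLE (e.reg .rsp - 16) 8 = (e.reg .r14).toNat := hbody.slot_r14
  have k_r13 : v.mem.readLE (e.reg .rsp - 24) 8 = (e.reg .r13).toNat := hbody.slot_r13
  have k_r12 : v.mem.readLE (e.reg .rsp - 32) 8 = (e.reg .r12).toNat := hbody.slot_r12
  have k_rbp : v.mem.readLE (e.reg .rsp - 40) 8 = (e.reg .rbp).toNat := hbody.slot_rbp
  have k_rbx : v.mem.readLE (e.reg .rsp - 48) 8 = (e.reg .rbx).toNat := hbody.slot_rbx
  have k_ra : UInt64.ofNat (v.mem.readLE (e.reg .rsp) 8) = ret := hbody.slot_ra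
  have hsame : Mem.SameExcept
    [⟨(e.reg .rsp).toNat - 688, (e.reg .rsp).toNat⟩,
     shadowSpan ((e.reg .rsp).toNat - 120) ((e.reg .rsp).toNat - 56),
     ⟨(e.reg .rsi).toNat, (e.reg .rsi).toNat + n⟩,
     ⟨F.pv + 20, F.pv + 64⟩,
     ⟨F.pv + 88, F.pv + 344⟩,
     ⟨F.pv + 344, F.pv + 4439⟩,
     ⟨F.pv + 4439, F.pv + 8535⟩,
     ⟨F.pv + 8536, F.pv + 24920⟩,
     ⟨F.gif + 96, F.gif + 100⟩,
     ⟨R.cur, R.cur + 8⟩] e.mem v.mem := hbody.same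
  -- where the cursor, gif, the private object and the buffer are, as numbers
  have hcur := henv.ctx.cursor_range henv.heap.inv.shadow
  have hbase := henv.heap.base
  have hgin0 := henv.ok.owns.inside henv.heap.inv.heap (o := (F.gif, 120)) List.mem_cons_self
  have hpin0 := henv.ok.owns.inside henv.heap.inv.heap (o := (F.pv, 24936)) (List.mem_cons_of_mem _ List.mem_cons_self)
  simp only at hgin0 hpin0
  rw [hbase] at hgin0 hpin0
  have hg1 : 0x800040 ≤ F.gif := by omega
  have hg2 : F.gif + 152 ≤ 0xC00000 := by omega
  have hp1 : 0x800040 ≤ F.pv := by omega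
  have hp2 : F.pv + 24968 ≤ 0xC00000 := by omega
  clear hgin0 hpin0
  have hab : (e.reg .rsp).toNat + 8 ≤ (e.reg .rsi).toNat := hbuf.above hn1 henv.heap he_top
  have hwhere := hbuf.live.where_ henv.heap.inv.shadow henv.heap.shadowPre.offText (by omega)
  have hb2 : (e.reg .rsi).toNat + n ≤ 0xC00000 := by omega
  clear hwhere
  -- THE WALK, to the call's return address
  u_walk hcode [hμ.vendor] until [Gif.L.DGifGetLine.ret7] span [ProgX.Base.L.textLo, ProgX.Base.L.textHi] side (v_side)
  case call_inv =>
    v_inv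
  case pre_10a2cd =>
    -- DGifDecompressLine'S PRECONDITION. The environment for the frame list with the own frame in front: only the return address
    -- was pushed since `v`
    have hs : Mem.SameExcept [⟨(e.reg .rsp).toNat - 688, (e.reg .rsp).toNat - 120⟩] v.mem s_10a2cd.mem := by
      rw [w_mem]
      u_same
    have henv' : Env H rest (DGifGetLine.framesIn frames e) F R s_10a2cd := by
      refine henv.at_call hbody.inv hbody.ok hs (by omega) (by omega) ?_ ?_ ?_
      · rw [w_rsp]
        u_omega
      · rw [w_rsp]
        u_omega
      · rw [w_rsp]
        u_omega
    -- `LZOK` at the callee's entry: the pushed return address is far from pv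
    have hlz' : LZOK s_10a2cd.mem F.pv := by
      apply hbody.lz.sameExcept hs (by omega)
      intro w hw
      have ew := List.mem_singleton.mp hw
      rw [ew]
      left
      simp only
      omega
    -- the seven clauses: `Env`, `LZOK`, `rdi = gif`, `edx = n`, `n < 2 ^ 31`, the buffer (the entry's, one more frame)
    refine ⟨henv', hlz', ?_, ?_, hn31, Or.inr ⟨?_, ?_⟩⟩
    · rw [w_rdi]
      exact hrdi
    · rw [w_rdx, toNat_ofBV32, toNat_part32, hr13]
      omega
    · rw [w_rsi]
      exact hbuf.push _
    · rw [w_rsi]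
      exact hsep
  -- 0x10a2d2 (ret7): DGifDecompressLine HAS RETURNED
  obtain ⟨hback, hlz1, hres⟩ := w_post
  have hs0 : Mem.SameExcept [⟨(e.reg .rsp).toNat - 688, (e.reg .rsp).toNat - 120⟩] v.mem s_10a2cd.mem := by
    rw [w_mem_10a2cd]
    u_same
  have hrem0 : rem R s_10a2cd.mem = rem R v.mem := by
    apply rem_sameExcept hs0 (by omega)
    intro w hw
    have ew := List.mem_singleton.mp hw
    rw [ew]
    simp only
    omega
  have e_top : (s_10a2cd.reg .rsp).toNat + 8 = (e.reg .rsp).toNat - 120 := by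
    rw [w_rsp_10a2cd]
    u_omega
  -- the callee's footprint in terms of `v` (`w_same : SameExcept […] v.mem s_10a2cdr.mem`)
  v_after_call w_rsp_10a2cd w_mem_10a2cd
  simp only [w_rsi_10a2cd] at w_same
  -- THE SLOTS AND THE RETURN ADDRESS, over the pushed return address (first step) and through DGifDecompressLine's footprint
  -- (second step: `Line` lies above the entry's `rsp + 8`, pv and gif in the heap, the cursor above, the callee's stack below)
  have hp_r15 : s_10a2cd.mem.readLE (e.reg .rsp - 8) 8 = (e.reg .r15).toNat := by
    rw [w_mem_10a2cd]
    u_frame k_r15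
  rw [w_mem_10a2cd] at hp_r15
  have hs_r15 : s_10a2cdr.mem.readLE (e.reg .rsp - 8) 8 = (e.reg .r15).toNat := by u_frame hp_r15
  have hp_r14 : s_10a2cd.mem.readLE (e.reg .rsp - 16) 8 = (e.reg .r14).toNat := by
    rw [w_mem_10a2cd]
    u_frame k_r14
  rw [w_mem_10a2cd] at hp_r14
  have hs_r14 : s_10a2cdr.mem.readLE (e.reg .rsp - 16) 8 = (e.reg .r14).toNat := by u_frame hp_r14
  have hp_r13 : s_10a2cd.mem.readLE (e.reg .rsp - 24) 8 = (e.reg .r13).toNat := by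
    rw [w_mem_10a2cd]
    u_frame k_r13
  rw [w_mem_10a2cd] at hp_r13
  have hs_r13 : s_10a2cdr.mem.readLE (e.reg .rsp - 24) 8 = (e.reg .r13).toNat := by u_frame hp_r13
  have hp_r12 : s_10a2cd.mem.readLE (e.reg .rsp - 32) 8 = (e.reg .r12).toNat := by
    rw [w_mem_10a2cd]
    u_frame k_r12
  rw [w_mem_10a2cd] at hp_r12
  have hs_r12 : s_10a2cdr.mem.readLE (e.reg .rsp - 32) 8 = (e.reg .r12).toNat := by u_frame hp_r12
  have hp_rbp : s_10a2cd.mem.readLE (e.reg .rsp - 40) 8 = (e.reg .rbp).toNat := by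
    rw [w_mem_10a2cd]
    u_frame k_rbp
  rw [w_mem_10a2cd] at hp_rbp
  have hs_rbp : s_10a2cdr.mem.readLE (e.reg .rsp - 40) 8 = (e.reg .rbp).toNat := by u_frame hp_rbp
  have hp_rbx : s_10a2cd.mem.readLE (e.reg .rsp - 48) 8 = (e.reg .rbx).toNat := by
    rw [w_mem_10a2cd]
    u_frame k_rbx
  rw [w_mem_10a2cd] at hp_rbx
  have hs_rbx : s_10a2cdr.mem.readLE (e.reg .rsp - 48) 8 = (e.reg .rbx).toNat := by u_frame hp_rbx
  have hp_ra : UInt64.ofNat (s_10a2cd.mem.readLE (e.reg .rsp) 8) = ret := by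
    rw [w_mem_10a2cd]
    u_frame k_ra
  rw [w_mem_10a2cd] at hp_ra
  have hs_ra : UInt64.ofNat (s_10a2cdr.mem.readLE (e.reg .rsp) 8) = ret := by u_frame hp_ra
  -- the footprint since the entry: DGifDecompressLine's windows lie inside the function's
  have hsame1 : Mem.SameExcept
    [⟨(e.reg .rsp).toNat - 688, (e.reg .rsp).toNat⟩,
     shadowSpan ((e.reg .rsp).toNat - 120) ((e.reg .rsp).toNat - 56),
     ⟨(e.reg .rsi).toNat, (e.reg .rsi).toNat + n⟩,
     ⟨F.pv + 20, F.pv + 64⟩,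
     ⟨F.pv + 88, F.pv + 344⟩,
     ⟨F.pv + 344, F.pv + 4439⟩,
     ⟨F.pv + 4439, F.pv + 8535⟩,
     ⟨F.pv + 8536, F.pv + 24920⟩,
     ⟨F.gif + 96, F.gif + 100⟩,
     ⟨R.cur, R.cur + 8⟩] e.mem s_10a2cdr.mem := by u_same
  -- the heap's invariant comes back with the clean stack at the callee's `rsp + 8` = the body's `rsp`
  have hinv1 : HeapInv H rest (DGifGetLine.framesIn frames e) ((e.reg .rsp).toNat - 120) s_10a2cdr.mem := by
    rw [← e_top]
    exact hback.inv
  -- THE EXIT ASSERTION: `Body` at `ret7` …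
  have hbody1 : DGifGetLine.Body Gif.L.DGifGetLine.ret7 H rest frames F R n u₀ e ret s_10a2cdr := {
    entry := hbody.entry
    pre := hbody.pre
    rip := w_rip
    rsp := w_rsp
    rbp := (w_kept.get .rbp rfl).trans hbody.rbp
    r15 := (w_kept.get .r15 rfl).trans hbody.r15
    r12 := (w_kept.get .r12 rfl).trans hbody.r12
    slot_r15 := hs_r15
    slot_r14 := hs_r14
    slot_r13 := hs_r13
    slot_r12 := hs_r12
    slot_rbp := hs_rbp
    slot_rbx := hs_rbx
    slot_ra := hs_ra
    inv := hinv1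
    ok := hback.ok
    lz := hlz1
    rem := by
      refine Nat.le_trans hback.rem ?_
      rw [hrem0]
      exact hbody.rem
    same := hsame1
    code := w_code
    abi := w_inv
  }
  -- … and what is live at `ret7`: `Private` in `r14`, the result in `rax`
  refine ReachVia.done ?_
  exact {
    body := hbody1
    r14 := by
      rw [w_kept.get .r14 rfl]
      exact hr14
    res := hres
  }

/-- **`Body` over the return address that a check call pushed** (`[RA − 128, RA − 120)`, just below the body's stack pointer): every
field of `Body` at the new cut `cut'`, and the reader's measure unchanged. Used by the two arms of `gl2_seg_tail` behind the check. -/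
theorem gl2_body_store (Lay : Layout) (hLay : Lay.hi = 0x1000000) {cut cut' : Word} {H : Heap} {rest : List Obj} {frames : List (Nat × FrameLayout)} {F : Forest} {R : Rd}
    {n : Nat} {u₀ e : State} {ret : Word} {v s : State} (val : Nat)
    (hbody : DGifGetLine.Body cut H rest frames F R n u₀ e ret v)
    (hrip : s.rip = cut') (hrsp : s.reg .rsp = e.reg .rsp - 120)
    (hrbp : s.reg .rbp = v.reg .rbp) (hr15 : s.reg .r15 = v.reg .r15) (hr12 : s.reg .r12 = v.reg .r12)
    (hmem : s.mem = v.mem.writeLE (e.reg .rsp - 128) 8 val)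
    (hcode : (conv u₀).code.In s.mem) (habi : (conv u₀).inv s) :
    DGifGetLine.Body cut' H rest frames F R n u₀ e ret s ∧ rem R s.mem = rem R v.mem := by
  have he := hbody.entry
  v_entry he
  obtain ⟨henv, hlz0, hrdi, hrdx, hn1, hn31, hbuf, hsep⟩ := hbody.pre
  have k_r15 : v.mem.readLE (e.reg .rsp - 8) 8 = (e.reg .r15).toNat := hbody.slot_r15
  have k_r14 : v.mem.readLE (e.reg .rsp - 16) 8 = (e.reg .r14).toNat := hbody.slot_r14
  have k_r13 : v.mem.readLE (e.reg .rsp - 24) 8 = (e.reg .r13).toNat := hbody.slot_r13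
  have k_r12 : v.mem.readLE (e.reg .rsp - 32) 8 = (e.reg .r12).toNat := hbody.slot_r12
  have k_rbp : v.mem.readLE (e.reg .rsp - 40) 8 = (e.reg .rbp).toNat := hbody.slot_rbp
  have k_rbx : v.mem.readLE (e.reg .rsp - 48) 8 = (e.reg .rbx).toNat := hbody.slot_rbx
  have k_ra : UInt64.ofNat (v.mem.readLE (e.reg .rsp) 8) = ret := hbody.slot_ra
  have hsame : Mem.SameExcept
    [⟨(e.reg .rsp).toNat - 688, (e.reg .rsp).toNat⟩,
     shadowSpan ((e.reg .rsp).toNat - 120) ((e.reg .rsp).toNat - 56),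
     ⟨(e.reg .rsi).toNat, (e.reg .rsi).toNat + n⟩,
     ⟨F.pv + 20, F.pv + 64⟩,
     ⟨F.pv + 88, F.pv + 344⟩,
     ⟨F.pv + 344, F.pv + 4439⟩,
     ⟨F.pv + 4439, F.pv + 8535⟩,
     ⟨F.pv + 8536, F.pv + 24920⟩,
     ⟨F.gif + 96, F.gif + 100⟩,
     ⟨R.cur, R.cur + 8⟩] e.mem v.mem := hbody.same
  have hcur := henv.ctx.cursor_range henv.heap.inv.shadow
  have hbase := henv.heap.base
  have hpin0 := henv.ok.owns.inside henv.heap.inv.heap (o := (F.pv, 24936)) (List.mem_cons_of_mem _ List.mem_cons_self)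
  simp only at hpin0
  rw [hbase] at hpin0
  have hp1 : 0x800040 ≤ F.pv := by omega
  have hp2 : F.pv + 24968 ≤ 0xC00000 := by omega
  clear hpin0
  -- the store since `v`: the check call's return address (stack)
  obtain ⟨hinvA, hokA, hremA⟩ := store_stack hbody.inv hbody.ok ⟨hcur.1, hcur.2.1⟩ (e.reg .rsp - 128) 8 val
    (by u_omega) (by u_omega)
  rw [← hmem] at hinvA hokA hremA
  have hs : Mem.SameExcept [⟨(e.reg .rsp).toNat - 688, (e.reg .rsp).toNat - 120⟩] v.mem s.mem := by
    rw [hmem]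
    u_same
  have hlz : LZOK s.mem F.pv := by
    apply hbody.lz.sameExcept hs (by omega)
    intro w hw
    have ew := List.mem_singleton.mp hw
    rw [ew]
    left
    simp only
    omega
  refine ⟨?_, hremA⟩
  exact {
    entry := hbody.entry
    pre := hbody.pre
    rip := hrip
    rsp := hrsp
    rbp := hrbp.trans hbody.rbp
    r15 := hr15.trans hbody.r15
    r12 := hr12.trans hbody.r12
    slot_r15 := by
      rw [hmem]
      u_frame k_r15
    slot_r14 := by
      rw [hmem]
      u_frame k_r14
    slot_r13 := by
      rw [hmem]
      u_frame k_r13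
    slot_r12 := by
      rw [hmem]
      u_frame k_r12
    slot_rbp := by
      rw [hmem]
      u_frame k_rbp
    slot_rbx := by
      rw [hmem]
      u_frame k_rbx
    slot_ra := by
      rw [hmem]
      u_frame k_ra
    inv := hinvA
    ok := hokA
    lz := hlz
    rem := by
      rw [hremA]
      exact hbody.rem
    same := by
      rw [hmem]
      u_same
    code := hcode
    abi := habi
  }

/-- **10A2D2H (ret7) … 10A2EAH | 10A28EH** (dgif_lib.c:504-505, 518, 520): `r13d = eax`; not GIF_OK: `ebx = 0`, to the epilogue; else
the checked load of `Private->PixelCount`: not 0: `ebx = r13d = 1`, to the epilogue; 0: the head of the flush loop. -/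
theorem gl2_seg_tail (Lay : Layout) (hLay : Lay.hi = 0x1000000) (μ : Microarch) (hμ : UserX.MicroOK μ) (u₀ : State)
    (hcode : HasCodeNat Lay u₀ Gif.L.DGifGetLine.entry Gif.Code.code_DGifGetLine.nat Gif.L.DGifGetLine.size)
    (H : Heap) (rest : List Obj) (frames : List (Nat × FrameLayout)) (F : Forest) (R : Rd) (n : Nat) (e : State) (ret : Word)
    (h_asan_load8_noabort : Asan.SmallCheck Lay μ ProgX.Base.WayInv (ProgX.Base.CodeOK u₀) [.rax, .rcx, .rdx] 8
      ProgX.Base.L.__asan_load8_noabort.entry)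
    (v : State) (hat : gl2_AtRet7 H rest frames F R n u₀ e ret v) :
    ReachVia Lay μ ProgX.Base.WayInv v (fun w =>
      (∃ m, DGifGetLine.Head m H rest frames F R n u₀ e ret w) ∨ DGifGetLine.Done H rest frames F R n u₀ e ret w) := by
  -- THE PRELUDE: the entry assertion, as in `gl2_seg_call`
  obtain ⟨hbody, hr14, hres⟩ := hat
  have he := hbody.entry
  v_entry he
  obtain ⟨henv, hlz0, hrdi, hrdx, hn1, hn31, hbuf, hsep⟩ := hbody.pre
  have w_rip := hbody.rip
  have c_rsp : v.reg .rsp = e.reg .rsp - 120 := hbody.rsp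
  -- `rax` and `r14` as variables (the branch fact of `cmp eax, 1` speaks of `z`; the load's address is `p + 56`)
  obtain ⟨z, c_rax⟩ : ∃ z, v.reg .rax = z := ⟨_, rfl⟩
  obtain ⟨p, c_r14⟩ : ∃ p, v.reg .r14 = p := ⟨_, rfl⟩
  rw [c_rax] at hres
  rw [c_r14] at hr14
  have w_kept : RegsKept [.rsp] v v := RegsKept.refl _ _
  have w_eq : Mem.EqOn ProgX.Base.L.textLo ProgX.Base.L.textHi u₀.mem v.mem := ProgX.Base.conv_code_eqOn hbody.code
  have hdf := (show abiInv _ from hbody.abi).1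
  have hmx := (show abiInv _ from hbody.abi).2
  have hsse := ProgX.Base.sseOK_of_abiInv hbody.abi
  have k_r15 : v.mem.readLE (e.reg .rsp - 8) 8 = (e.reg .r15).toNat := hbody.slot_r15
  have k_r14 : v.mem.readLE (e.reg .rsp - 16) 8 = (e.reg .r14).toNat := hbody.slot_r14
  have k_r13 : v.mem.readLE (e.reg .rsp - 24) 8 = (e.reg .r13).toNat := hbody.slot_r13
  have k_r12 : v.mem.readLE (e.reg .rsp - 32) 8 = (e.reg .r12).toNat := hbody.slot_r12
  have k_rbp : v.mem.readLE (e.reg .rsp - 40) 8 = (e.reg .rbp).toNat := hbody.slot_rbp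
  have k_rbx : v.mem.readLE (e.reg .rsp - 48) 8 = (e.reg .rbx).toNat := hbody.slot_rbx
  have k_ra : UInt64.ofNat (v.mem.readLE (e.reg .rsp) 8) = ret := hbody.slot_ra
  have hsame : Mem.SameExcept
    [⟨(e.reg .rsp).toNat - 688, (e.reg .rsp).toNat⟩,
     shadowSpan ((e.reg .rsp).toNat - 120) ((e.reg .rsp).toNat - 56),
     ⟨(e.reg .rsi).toNat, (e.reg .rsi).toNat + n⟩,
     ⟨F.pv + 20, F.pv + 64⟩,
     ⟨F.pv + 88, F.pv + 344⟩,
     ⟨F.pv + 344, F.pv + 4439⟩,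
     ⟨F.pv + 4439, F.pv + 8535⟩,
     ⟨F.pv + 8536, F.pv + 24920⟩,
     ⟨F.gif + 96, F.gif + 100⟩,
     ⟨R.cur, R.cur + 8⟩] e.mem v.mem := hbody.same
  -- where the cursor, gif and the private object are, as numbers
  have hcur := henv.ctx.cursor_range henv.heap.inv.shadow
  have hbase := henv.heap.base
  have hgin0 := henv.ok.owns.inside henv.heap.inv.heap (o := (F.gif, 120)) List.mem_cons_self
  have hpin0 := henv.ok.owns.inside henv.heap.inv.heap (o := (F.pv, 24936)) (List.mem_cons_of_mem _ List.mem_cons_self)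
  simp only at hgin0 hpin0
  rw [hbase] at hgin0 hpin0
  have hg1 : 0x800040 ≤ F.gif := by omega
  have hg2 : F.gif + 152 ≤ 0xC00000 := by omega
  have hp1 : 0x800040 ≤ F.pv := by omega
  have hp2 : F.pv + 24968 ≤ 0xC00000 := by omega
  clear hgin0 hpin0
  -- the private object is live under the body's frames: what the check goal asks
  have hpl : LiveIn (H.liveObjs ++ rest) (DGifGetLine.framesIn frames e) F.pv 24936 :=
    hbody.ok.pv_live.liveIn rest _ (Nat.le_refl _) (Nat.le_refl _)
  -- THE WALK, three arms, to the epilogue's first instruction or the head of the flush loop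
  u_walk hcode [hμ.vendor] until [Gif.L.DGifGetLine.at_10a28e, Gif.L.DGifGetLine.at_10a2ea]
    span [ProgX.Base.L.textLo, ProgX.Base.L.textHi] side (v_side)
  case check_10a2de =>
    -- dgif_lib.c:505 the load of `Private->PixelCount`: 8 bytes inside the private object
    have hun : ShadowUntouched v.mem s_10a2de.mem := by v_untouched
    exact hpl.accSmall hbody.inv.shadow hun _ 8 (by decide) (by u_omega) (by u_omega)
  · -- 0x10a28e FROM 0x10a30f: DGifDecompressLine failed, `ebx = 0` (l.520); nothing stored since `v`
    have hbody1 : DGifGetLine.Body Gif.L.DGifGetLine.at_10a28e H rest frames F R n u₀ e ret s_10a30f := {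
      entry := hbody.entry
      pre := hbody.pre
      rip := w_rip
      rsp := w_rsp
      rbp := (w_kept.get .rbp rfl).trans hbody.rbp
      r15 := (w_kept.get .r15 rfl).trans hbody.r15
      r12 := (w_kept.get .r12 rfl).trans hbody.r12
      slot_r15 := by
        rw [w_mem]
        exact k_r15
      slot_r14 := by
        rw [w_mem]
        exact k_r14
      slot_r13 := by
        rw [w_mem]
        exact k_r13
      slot_r12 := by
        rw [w_mem]
        exact k_r12
      slot_rbp := by
        rw [w_mem]
        exact k_rbp
      slot_rbx := by
        rw [w_mem]
        exact k_rbx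
      slot_ra := by
        rw [w_mem]
        exact k_ra
      inv := by
        rw [w_mem]
        exact hbody.inv
      ok := by
        rw [w_mem]
        exact hbody.ok
      lz := by
        rw [w_mem]
        exact hbody.lz
      rem := by
        rw [w_mem]
        exact hbody.rem
      same := by
        rw [w_mem]
        exact hsame
      code := ProgX.Base.conv_code_in w_eq
      abi := by
        refine ProgX.Base.abiInv_of ?_ ?_
        · rw [w_flags]
          simp only [X86.User.df_setStatus]
          exact hdf
        · rw [w_mxcsr]
          exact hmx
    }
    refine ReachVia.done (Or.inr ?_)
    exact {
      body := hbody1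
      res := by
        right
        rw [w_rbx]
        decide
    }
  · -- 0x10a28e FROM 0x10a308: GIF_OK and `PixelCount ≠ 0`: `ebx = r13d = 1` (l.518)
    have habi : (conv u₀).inv s_10a308 := by
      refine ProgX.Base.abiInv_of ?_ ?_
      · rw [w_flags]
        simp only [X86.User.df_setStatus]
        exact w_df_10a2de
      · rw [w_mxcsr]
        exact hmx
    obtain ⟨hbody1, _⟩ := gl2_body_store Lay hLay (cut' := Gif.L.DGifGetLine.at_10a28e) 1090275 hbody w_rip w_rsp
      (w_kept.get .rbp rfl) (w_kept.get .r15 rfl) (w_kept.get .r12 rfl) w_mem (ProgX.Base.conv_code_in w_eq) habi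
    refine ReachVia.done (Or.inr ?_)
    exact {
      body := hbody1
      res := by
        left
        rw [w_rbx, toNat_ofBV32, hbr_10a2d8]
        decide
    }
  · -- 0x10a2ea FROM 0x10a2e8: GIF_OK and `PixelCount = 0`: the head of the flush loop, `r13d = 1`, the measure is what it is
    have habi : (conv u₀).inv s_10a2e8 := by
      refine ProgX.Base.abiInv_of ?_ ?_
      · rw [w_flags]
        simp only [X86.User.df_setStatus]
        exact w_df_10a2de
      · rw [w_mxcsr]
        exact hmx
    obtain ⟨hbody1, _⟩ := gl2_body_store Lay hLay (cut' := Gif.L.DGifGetLine.at_10a2ea) 1090275 hbody w_rip w_rsp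
      (w_kept.get .rbp rfl) (w_kept.get .r15 rfl) (w_kept.get .r12 rfl) w_mem (ProgX.Base.conv_code_in w_eq) habi
    refine ReachVia.done (Or.inl ⟨rem R s_10a2e8.mem, ?_⟩)
    exact {
      body := hbody1
      r13 := by
        rw [w_r13, toNat_ofBV32, hbr_10a2d8]
        decide
      measure := rfl
    }

end Gif.Spec.DGifGetLine_2
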